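-- pv_equiv track=rewrite | github.com/freewimoe/eskar-housing-finder-heroku-clean | fix_flake8.py | fix_blank_lines
-- ===== SOURCE A (Python) =====
-- def fix_blank_lines(content):
--     """Fix blank line issues (E302, E305)"""
--     lines = content.split('\n')
--     fixed_lines = []
--
--     i = 0
--     while i < len(lines):
--         line = lines[i].strip()
--
--         # Check if this is a function or class definition
--         if (line.startswith('def ') or line.startswith('class ')) and i > 0:
--             # Check if we need 2 blank lines before
--             prev_lines = []
--             j = i - 1
--             while j >= 0 and lines[j].strip() == '':
--                 prev_lines.append('')
--                 j -= 1
--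
--             # If previous non - empty line exists and we don't have 2 blank lines
--             if j >= 0 and len(prev_lines) < 2:
--                 # Add necessary blank lines
--                 while len(prev_lines) < 2:
--                     prev_lines.append('')
--
--                 # Remove old blank lines and add correct number
--                 while fixed_lines and fixed_lines[-1] == '':
--                     fixed_lines.pop()
--
--                 fixed_lines.extend(['', ''])
--
--         fixed_lines.append(lines[i])
--         i += 1
--
--     return '\n'.join(fixed_lines)
-- ===== SOURCE B (Python) =====
-- def fix_blank_lines(content):
--     """Fix blank line issues (E302, E305)"""
--     out = []
--     pending = []          # current run of blank (whitespace-only) lines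
--     seen = False          # a non-blank line has appeared
--     for line in content.split('\n'):
--         s = line.strip()
--         if s == '':
--             pending.append(line)
--         elif (s.startswith('def ') or s.startswith('class ')) and seen and len(pending) < 2:
--             while pending and pending[-1] == '':
--                 pending.pop()
--             out.extend(pending)
--             out.extend(['', '', line])
--             pending = []
--         else:
--             out.extend(pending)
--             out.append(line)
--             pending = []
--             seen = True
--     out.extend(pending)
--     return '\n'.join(out)
-- ===== Notes on version B (the rewrite author's own statement) =====
-- stated objective: alternative
-- what changed: Replaced A's indexed loop with its inner backward re-scan over earlier lines and its pop loop on the accumulated output by a single forward pass that buffers the current run of blank lines in a pending list and tracks a seen-nonblank flag.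
import Mathlib
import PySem

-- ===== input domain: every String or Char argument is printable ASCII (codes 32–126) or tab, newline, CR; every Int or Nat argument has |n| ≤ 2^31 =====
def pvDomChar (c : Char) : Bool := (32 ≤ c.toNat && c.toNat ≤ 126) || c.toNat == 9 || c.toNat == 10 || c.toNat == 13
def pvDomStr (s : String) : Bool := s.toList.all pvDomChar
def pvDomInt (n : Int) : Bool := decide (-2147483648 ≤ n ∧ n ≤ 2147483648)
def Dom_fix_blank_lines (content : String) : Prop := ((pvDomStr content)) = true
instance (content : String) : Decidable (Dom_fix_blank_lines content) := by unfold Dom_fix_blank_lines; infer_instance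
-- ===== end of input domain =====

-- B replaces A's backward re-scan over earlier lines and the pop loop on the output by a single
-- forward pass that buffers the current run of blank lines (objective: alternative decomposition).


-- ===== PORT A =====
-- inner 'while j >= 0 and lines[j].strip() == ""' started at j = k - 1; returns (prev_lines, final j).
-- (Python's later 'while len(prev_lines) < 2: prev_lines.append("")' only pads prev_lines, which is
-- never read afterwards, so it is not reproduced.)
def pvScanBackA (lines : List String) : Nat → (List String × Int)
  | 0 => ([], -1)
  | k + 1 =>
    if PySem.Str.strip (lines.getD k "") = "" then
      ("" :: (pvScanBackA lines k).1, (pvScanBackA lines k).2)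
    else ([], (k : Int))

-- 'while fixed_lines and fixed_lines[-1] == "": fixed_lines.pop()'
def pvPopBlanksA (fl : List String) : List String :=
  if h : fl = [] then fl
  else if fl.getLast h = "" then pvPopBlanksA fl.dropLast
  else fl
termination_by fl.length
decreasing_by
  have : fl.length ≠ 0 := by simpa [List.length_eq_zero_iff] using h
  simp [List.length_dropLast]; omega

-- the main 'while i < len(lines)' loop (lines.getD i "" is exact: i < lines.length is guarded)
def pvLoopA (lines : List String) (i : Nat) (fixed : List String) : List String :=
  if _h : i < lines.length then
    pvLoopA lines (i + 1)
      ((if (PySem.Str.startswith (PySem.Str.strip (lines.getD i "")) "def "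
            || PySem.Str.startswith (PySem.Str.strip (lines.getD i "")) "class ") && decide (0 < i) then
          (if decide (0 ≤ (pvScanBackA lines i).2) && decide ((pvScanBackA lines i).1.length < 2) then
             pvPopBlanksA fixed ++ ["", ""]
           else fixed)
        else fixed) ++ [lines.getD i ""])
  else fixed
termination_by lines.length - i

-- content.split('\n'): the separator "\n" is nonempty, so split? is always some
def fix_blank_lines (content : String) : String :=
  PySem.Str.join "\n" (pvLoopA ((PySem.Str.split? content "\n").getD []) 0 [])

-- ===== PORT B =====
-- 'while pending and pending[-1] == "": pending.pop()'
def pvPopPendingB (p : List String) : List String :=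
  if h : p = [] then p
  else if p.getLast h = "" then pvPopPendingB p.dropLast
  else p
termination_by p.length
decreasing_by
  have : p.length ≠ 0 := by simpa [List.length_eq_zero_iff] using h
  simp [List.length_dropLast]; omega

-- loop body of B; state = (out, pending, seen)
def pvStepB (st : List String × List String × Bool) (line : String) : List String × List String × Bool :=
  if PySem.Str.strip line = "" then (st.1, st.2.1 ++ [line], st.2.2)
  else if (PySem.Str.startswith (PySem.Str.strip line) "def "
           || PySem.Str.startswith (PySem.Str.strip line) "class ")
          && st.2.2 && decide (st.2.1.length < 2) then
    (st.1 ++ pvPopPendingB st.2.1 ++ ["", "", line], [], st.2.2)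
  else (st.1 ++ st.2.1 ++ [line], [], true)

def fix_blank_lines_alt (content : String) : String :=
  PySem.Str.join "\n"
    ((((PySem.Str.split? content "\n").getD []).foldl pvStepB ([], [], false)).1
     ++ (((PySem.Str.split? content "\n").getD []).foldl pvStepB ([], [], false)).2.1)

-- ===== PRECONDITION & SPEC =====
def Spec_fix_blank_lines (content : String) (out : String) : Prop := out = fix_blank_lines_alt content
instance (content : String) (out : String) : Decidable (Spec_fix_blank_lines content out) := by unfold Spec_fix_blank_lines; infer_instance

-- ===== CLAIM (what is proved, stated in full; the proofs are below) =====
def Claim_equal_fix_blank_lines : Prop := ∀ (content : String), Dom_fix_blank_lines content → Spec_fix_blank_lines content (fix_blank_lines content)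

-- ===== LEMMAS AND PROOFS =====

lemma pvScanBackA_spec (L q bs : List String)
    (hq : ∀ h : q ≠ [], PySem.Str.strip (q.getLast h) ≠ "")
    (hbs : ∀ l ∈ bs, PySem.Str.strip l = "")
    (ht : L.take (q.length + bs.length) = q ++ bs) :
    pvScanBackA L (q.length + bs.length) = (List.replicate bs.length "", (q.length : Int) - 1) := by
  induction bs using List.reverseRecOn with
  | nil =>
    simp only [List.length_nil, Nat.add_zero, List.append_nil] at ht ⊢
    cases q with
    | nil => simp [pvScanBackA]
    | cons a q' =>
      have hlen : (a :: q').length ≤ L.length := by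
        have := congrArg List.length ht; rw [List.length_take] at this
        simp only [List.length_cons] at this ⊢; omega
      have hm : q'.length < L.length := by simp only [List.length_cons] at hlen; omega
      have h1 := List.getElem_of_eq ht (show q'.length < (L.take (a :: q').length).length by
        simp [List.length_take]; omega)
      rw [List.getElem_take] at h1
      have hL : L[q'.length] = (a :: q').getLast (by simp) := by
        rw [h1, List.getLast_eq_getElem]; simp
      show pvScanBackA L (q'.length + 1) = _
      rw [pvScanBackA, List.getD_eq_getElem L "" hm, hL, if_neg (hq (by simp))]
      simp
  | append_singleton bs b ih =>
    have hle : q.length + (bs ++ [b]).length ≤ L.length := by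
      have := congrArg List.length ht; rw [List.length_take] at this
      simp only [List.length_append, List.length_cons, List.length_nil] at this ⊢; omega
    have hidx : q.length + bs.length < L.length := by simp at hle; omega
    have h1 := List.getElem_of_eq ht (show q.length + bs.length < (L.take (q.length + (bs ++ [b]).length)).length by
      simp [List.length_take]; omega)
    rw [List.getElem_take] at h1
    have hL : L[q.length + bs.length] = b := by
      rw [h1, List.getElem_append_right (by simp), List.getElem_append_right (by simp)]; simp
    have ht' : L.take (q.length + bs.length) = q ++ bs := by
      have h2 : L.take (q.length + bs.length) = (L.take (q.length + (bs ++ [b]).length)).take (q.length + bs.length) := by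
        rw [List.take_take]; congr 1; simp
      rw [h2, ht, ← List.append_assoc]
      exact List.take_left' (by simp)
    have heq : q.length + (bs ++ [b]).length = (q.length + bs.length) + 1 := by
      simp only [List.length_append, List.length_cons, List.length_nil]; omega
    rw [heq, pvScanBackA, List.getD_eq_getElem L "" hidx, hL, if_pos (hbs b (by simp))]
    rw [ih (fun l hl => hbs l (by simp [hl])) ht']
    simp [List.replicate_succ]

lemma pvPopBlanksA_append (out p : List String)
    (hout : ∀ h : out ≠ [], PySem.Str.strip (out.getLast h) ≠ "") :
    pvPopBlanksA (out ++ p) = out ++ pvPopPendingB p := by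
  induction p using List.reverseRecOn with
  | nil =>
    rw [pvPopPendingB, pvPopBlanksA]
    simp only [List.append_nil, dif_pos]
    by_cases h : out = []
    · simp [h]
    · rw [dif_neg h, if_neg]
      intro he
      exact hout h (by rw [he]; rfl)
  | append_singleton p b ih =>
    have hne : out ++ (p ++ [b]) ≠ [] := by simp
    have hlast : (out ++ (p ++ [b])).getLast hne = b := by
      simp
    have hdrop : (out ++ (p ++ [b])).dropLast = out ++ p := by
      rw [List.dropLast_append_of_ne_nil (by simp), List.dropLast_concat]
    have hne2 : p ++ [b] ≠ [] := by simp
    have hlast2 : (p ++ [b]).getLast hne2 = b := List.getLast_concat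
    have hdrop2 : (p ++ [b]).dropLast = p := List.dropLast_concat
    rw [pvPopBlanksA, dif_neg hne, hlast, pvPopPendingB, dif_neg hne2, hlast2, hdrop, hdrop2]
    by_cases hb : b = ""
    · rw [if_pos hb, if_pos hb, ih]
    · rw [if_neg hb, if_neg hb]

lemma pv_main (k : Nat) : ∀ (L q out pending : List String) (seen : Bool),
    q.length + pending.length + k = L.length →
    L.take (q.length + pending.length) = q ++ pending →
    (∀ l ∈ pending, PySem.Str.strip l = "") →
    (seen = true ↔ q ≠ []) →
    (∀ h : q ≠ [], PySem.Str.strip (q.getLast h) ≠ "") →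
    (∀ h : out ≠ [], PySem.Str.strip (out.getLast h) ≠ "") →
    pvLoopA L (q.length + pending.length) (out ++ pending)
      = ((L.drop (q.length + pending.length)).foldl pvStepB (out, pending, seen)).1
        ++ ((L.drop (q.length + pending.length)).foldl pvStepB (out, pending, seen)).2.1 := by
  induction k with
  | zero =>
    intro L q out pending seen hk ht hp hseen hq hout
    have hi : ¬ (q.length + pending.length < L.length) := by omega
    rw [pvLoopA, dif_neg hi, List.drop_of_length_le (by omega)]
    simp
  | succ k ih =>
    intro L q out pending seen hk ht hp hseen hq hout
    set i := q.length + pending.length with hidef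
    have hi : i < L.length := by omega
    have hgetD : L.getD i "" = L[i] := List.getD_eq_getElem L "" hi
    have hdrop : L.drop i = L[i] :: L.drop (i + 1) := List.drop_eq_getElem_cons hi
    have htake1 : L.take (i + 1) = (q ++ pending) ++ [L[i]] := by
      rw [List.take_succ_eq_append_getElem hi, ht]
    rw [pvLoopA, dif_pos hi, hdrop, List.foldl_cons, hgetD]
    by_cases hblank : PySem.Str.strip L[i] = ""
    · -- blank line: goes to pending; A's def-test is false on the empty stripped line
      have hsw : ∀ pre, PySem.Str.startswith (PySem.Str.strip L[i]) pre
          = PySem.Str.startswith "" pre := by intro pre; rw [hblank]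
      rw [hsw "def ", hsw "class "]
      have : (PySem.Str.startswith "" "def " || PySem.Str.startswith "" "class ") = false := rfl
      rw [this, Bool.false_and, if_neg (by simp)]
      rw [pvStepB, if_pos hblank]
      have hstep : (out, pending, seen).1 = out := rfl
      have := ih L q out (pending ++ [L[i]]) seen
        (by simp; omega)
        (by simpa [List.append_assoc] using htake1)
        (by intro l hl; rcases List.mem_append.1 hl with h | h
            · exact hp l h
            · rw [List.mem_singleton.1 h]; exact hblank)
        hseen hq hout
      simp only [List.length_append, List.length_cons, List.length_nil] at this
      rw [show i + 1 = q.length + (pending.length + 1) by omega]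
      simpa [List.append_assoc] using this
    · -- non-blank line
      have hscan : pvScanBackA L i = (List.replicate pending.length "", (q.length : Int) - 1) :=
        pvScanBackA_spec L q pending hq hp ht
      by_cases hins : ((PySem.Str.startswith (PySem.Str.strip L[i]) "def "
                        || PySem.Str.startswith (PySem.Str.strip L[i]) "class ") = true
                       ∧ seen = true ∧ pending.length < 2)
      · -- insertion branch in both programs
        obtain ⟨hcond, hsn, hlen2⟩ := hins
        have hqne : q ≠ [] := hseen.1 hsn
        have hqpos : 0 < q.length := List.length_pos_iff.2 hqne
        have hApos : ((PySem.Str.startswith (PySem.Str.strip (L[i])) "def "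
            || PySem.Str.startswith (PySem.Str.strip (L[i])) "class ") && decide (0 < i)) = true := by
          rw [hcond]; simp; omega
        rw [hApos, if_pos rfl]
        have hAguard : (decide (0 ≤ (pvScanBackA L i).2) && decide ((pvScanBackA L i).1.length < 2)) = true := by
          rw [hscan]; simp; omega
        rw [hAguard, if_pos rfl]
        rw [pvStepB, if_neg hblank, if_pos (by rw [hcond, hsn]; simp [hlen2])]
        rw [pvPopBlanksA_append out pending hout]
        have := ih L ((q ++ pending) ++ [L[i]]) (out ++ pvPopPendingB pending ++ ["", "", L[i]]) [] seen
          (by simp; omega)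
          (by simpa using htake1)
          (by intro l hl; simp at hl)
          (by simp [hsn])
          (by intro h; simpa using hblank)
          (by intro h; simpa using hblank)
        simp only [List.length_append, List.length_cons, List.length_nil] at this
        rw [show i + 1 = q.length + pending.length + 1 + 0 by omega]
        simpa [List.append_assoc] using this
      · -- no insertion: A appends the line as is, B flushes pending and appends it
        have hB : pvStepB (out, pending, seen) L[i] = (out ++ pending ++ [L[i]], [], true) := by
          rw [pvStepB, if_neg hblank, if_neg]
          simp only [Bool.and_eq_true, decide_eq_true_eq]
          rintro ⟨⟨h1, h2⟩, h3⟩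
          exact hins ⟨h1, h2, h3⟩
        have hA : (if (PySem.Str.startswith (PySem.Str.strip L[i]) "def "
              || PySem.Str.startswith (PySem.Str.strip L[i]) "class ") && decide (0 < i) then
              (if decide (0 ≤ (pvScanBackA L i).2) && decide ((pvScanBackA L i).1.length < 2) then
                 pvPopBlanksA (out ++ pending) ++ ["", ""]
               else out ++ pending)
            else out ++ pending) = out ++ pending := by
          by_cases hc : (PySem.Str.startswith (PySem.Str.strip L[i]) "def "
              || PySem.Str.startswith (PySem.Str.strip L[i]) "class ") = true
          · have hAguard : (decide (0 ≤ (pvScanBackA L i).2) && decide ((pvScanBackA L i).1.length < 2)) = false := by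
              rw [hscan]; simp
              intro hq1
              by_cases hsn : seen = true
              · have hlen2 : ¬ pending.length < 2 := fun hl => hins ⟨hc, hsn, hl⟩
                omega
              · have : q = [] := by
                  by_contra hne; exact hsn (hseen.2 hne)
                simp [this] at hq1
            rw [hAguard]
            simp
          · rw [if_neg (by simp only [Bool.and_eq_true]; rintro ⟨h1, _⟩; exact hc h1)]
        rw [hA, hB]
        have := ih L ((q ++ pending) ++ [L[i]]) (out ++ pending ++ [L[i]]) [] true
          (by simp; omega)
          (by simpa using htake1)
          (by intro l hl; simp at hl)
          (by simp)
          (by intro h; simpa using hblank)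
          (by intro h; simpa using hblank)
        simp only [List.length_append, List.length_cons, List.length_nil] at this
        rw [show i + 1 = q.length + pending.length + 1 + 0 by omega]
        simpa [List.append_assoc] using this

-- ===== VERDICT (by name: the statement is the Claim_ definition above) =====
theorem fix_blank_lines_spec : Claim_equal_fix_blank_lines := by
  intro content _
  unfold Spec_fix_blank_lines fix_blank_lines fix_blank_lines_alt
  have h := pv_main ((PySem.Str.split? content "\n").getD []).length
    ((PySem.Str.split? content "\n").getD []) [] [] [] false
    (by simp) (by simp) (by simp) (by simp) (by intro h; simp at h) (by intro h; simp at h)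
  simp only [List.length_nil, Nat.zero_add, List.drop_zero, List.nil_append] at h
  rw [h]
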